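-- pv_equiv track=rewrite | github.com/AK2002S/AI-Project | n_queens_hill_climbing.py | perform_hill_climb
-- ===== SOURCE A (Python) =====
-- def count_safe_queen_pairs(board):
--     """Count the number of non-attacking queen pairs."""
--     total_pairs = 28  # Total number of pairs of queens in an 8-queens problem (C(8, 2) = 28)
--     attacking_pairs = 0
--     for i in range(len(board)):
--         for j in range(i + 1, len(board)):
--             if board[i] == board[j] or abs(board[i] - board[j]) == abs(i - j):
--                 attacking_pairs += 1
--     return total_pairs - attacking_pairs
--
-- def perform_hill_climb(board):
--     """Perform hill-climbing to maximize the number of non-attacking pairs."""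
--     current_safe_pairs = count_safe_queen_pairs(board)
--     steps_taken = 0
--
--     while True:
--         steps_taken += 1
--         neighbors = []
--         for col in range(8):
--             for row in range(8):
--                 if board[col] != row:
--                     new_board = list(board)
--                     new_board[col] = row
--                     neighbors.append((new_board, count_safe_queen_pairs(new_board)))
--
--         # Sort neighbors by number of non-attacking pairs
--         neighbors.sort(key=lambda x: x[1], reverse=True)
--
--         # Choose the best neighbor
--         best_neighbor, best_safe_pairs = neighbors[0]
--
--         # Check if improvement is possible
--         if best_safe_pairs > current_safe_pairs:
--             board = best_neighbor
--             current_safe_pairs = best_safe_pairs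
--         else:
--             # No improvement, return current board
--             return board, current_safe_pairs, steps_taken
-- ===== SOURCE B (Python) =====
-- def count_safe_queen_pairs(board):
--     """Count non-attacking pairs in ONE pass: for each queen, add the number of
--     earlier queens sharing its row, down-diagonal (r-i) or up-diagonal (r+i),
--     read off three running hash counters (the three attack conditions are
--     mutually exclusive for distinct columns)."""
--     attacking = 0
--     rows, d1, d2 = {}, {}, {}
--     for i, r in enumerate(board):
--         attacking += rows.get(r, 0) + d1.get(r - i, 0) + d2.get(r + i, 0)
--         rows[r] = rows.get(r, 0) + 1
--         d1[r - i] = d1.get(r - i, 0) + 1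
--         d2[r + i] = d2.get(r + i, 0) + 1
--     return 28 - attacking
--
--
-- def perform_hill_climb(board):
--     """Hill climbing with a flat single-index neighbor scan keeping a running
--     best (strict '>' in generation order picks the same neighbor as A's stable
--     reverse sort), and O(n) counter-based scoring instead of O(n^2) pair loops."""
--     current = count_safe_queen_pairs(board)
--     steps = 0
--     while True:
--         steps += 1
--         best_board, best_score = None, None
--         for k in range(64):
--             col, row = divmod(k, 8)
--             if board[col] != row:
--                 cand = list(board)
--                 cand[col] = row
--                 score = count_safe_queen_pairs(cand)
--                 if best_score is None or score > best_score:
--                     best_board, best_score = cand, score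
--         if best_score > current:
--             board, current = best_board, best_score
--         else:
--             return board, current, steps
-- ===== Notes on version B (the rewrite author's own statement) =====
-- stated objective: faster
-- what changed: Scoring is a single counter-based pass (three hash counters keyed by row, r-i and r+i, adding each queen's attacks on earlier queens) instead of A's nested O(n^2) pair loops, and the build-all-neighbors-then-stable-reverse-sort step is replaced by a flat range(64) running-best scan (strict '>' in generation order picks the same neighbor as the stable reverse sort's head).
import Mathlib
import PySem

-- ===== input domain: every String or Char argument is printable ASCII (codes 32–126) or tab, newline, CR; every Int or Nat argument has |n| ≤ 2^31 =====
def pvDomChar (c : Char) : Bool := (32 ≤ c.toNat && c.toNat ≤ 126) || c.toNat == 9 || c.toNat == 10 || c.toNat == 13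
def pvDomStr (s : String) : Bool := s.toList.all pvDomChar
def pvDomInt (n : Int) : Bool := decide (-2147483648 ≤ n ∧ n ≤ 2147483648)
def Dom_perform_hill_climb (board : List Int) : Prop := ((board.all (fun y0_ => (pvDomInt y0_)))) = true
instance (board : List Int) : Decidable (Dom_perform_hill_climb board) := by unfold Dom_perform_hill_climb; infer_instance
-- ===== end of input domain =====

-- B scores a board in ONE counter-based pass instead of A's nested pair loops, and replaces A's
-- build-all-neighbors-then-stable-reverse-sort step by a flat single-index running-best scan.

-- ===== PORT A =====
def count_safe_queen_pairs (board : List Int) : Int :=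
  let n : Int := (board.length : Int)
  let attacking :=
    (PySem.List.pyRange 0 n 1).foldl (fun acc i =>
      (PySem.List.pyRange (i + 1) n 1).foldl (fun acc j =>
        if PySem.List.pyGetD board i 0 = PySem.List.pyGetD board j 0 ∨
           (PySem.List.pyGetD board i 0 - PySem.List.pyGetD board j 0).natAbs = (i - j).natAbs
        then acc + 1 else acc) acc) 0
  28 - attacking

-- A's neighbor generation: collect (new_board, score) for every col/row with board[col] ≠ row
def neighborsA (board : List Int) : List (List Int × Int) :=
  (PySem.List.pyRange 0 8 1).foldl (fun acc col =>
    (PySem.List.pyRange 0 8 1).foldl (fun acc row =>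
      if PySem.List.pyGetD board col 0 ≠ row then
        acc ++ [(PySem.List.pySetD board col row,
                 count_safe_queen_pairs (PySem.List.pySetD board col row))]
      else acc) acc) []

-- A's while-loop; fuel = (28 - current).toNat + 1 bounds the iterations (the score strictly
-- increases each improving step and is ≤ 28), so the fuel-exhausted branch is never reached.
def hillLoopA : Nat → List Int → Int → Int → List Int × Int × Int
  | 0, board, current, steps => (board, current, steps)
  | fuel + 1, board, current, steps =>
    let steps := steps + 1
    match (PySem.List.sorted (neighborsA board) (fun x => x.2) true).head? with
    | none => (board, current, steps)   -- unreachable: the neighbor list is never empty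
    | some best =>
      if best.2 > current then hillLoopA fuel best.1 best.2 steps
      else (board, current, steps)

def perform_hill_climb (board : List Int) : List Int × Int × Int :=
  let c := count_safe_queen_pairs board
  hillLoopA ((28 - c).toNat + 1) board c 0

-- ===== PORT B =====
-- B's single-pass scoring state ('attacking, rows, d1, d2'): for each (i, r) add the number of
-- earlier queens attacking it, read off three running counters keyed by r, r - i and r + i.
def countStepB (st : Int × PySem.Dict Int Int × PySem.Dict Int Int × PySem.Dict Int Int)
    (p : Int × Int) : Int × PySem.Dict Int Int × PySem.Dict Int Int × PySem.Dict Int Int :=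
  (st.1 + st.2.1.getD p.2 0 + st.2.2.1.getD (p.2 - p.1) 0 + st.2.2.2.getD (p.2 + p.1) 0,
   st.2.1.insert p.2 (st.2.1.getD p.2 0 + 1),
   st.2.2.1.insert (p.2 - p.1) (st.2.2.1.getD (p.2 - p.1) 0 + 1),
   st.2.2.2.insert (p.2 + p.1) (st.2.2.2.getD (p.2 + p.1) 0 + 1))

def count_safe_alt (board : List Int) : Int :=
  let st := (PySem.List.enumerate board).foldl countStepB
    (0, PySem.Dict.empty, PySem.Dict.empty, PySem.Dict.empty)
  28 - st.1

-- B's running best: 'if best_score is None or score > best_score: …'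
def bestStep (o : Option (List Int × Int)) (cand : List Int × Int) : Option (List Int × Int) :=
  match o with
  | none => some cand
  | some m => if cand.2 > m.2 then some cand else some m

-- 'for k in range(64): col, row = divmod(k, 8); …'
def bestNeighborB (board : List Int) : Option (List Int × Int) :=
  (PySem.List.pyRange 0 64 1).foldl (fun o k =>
    if PySem.List.pyGetD board (PySem.Int.floordiv k 8) 0 ≠ PySem.Int.mod k 8 then
      bestStep o (PySem.List.pySetD board (PySem.Int.floordiv k 8) (PySem.Int.mod k 8),
                  count_safe_alt (PySem.List.pySetD board (PySem.Int.floordiv k 8) (PySem.Int.mod k 8)))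
    else o) none

def hillLoopB : Nat → List Int → Int → Int → List Int × Int × Int
  | 0, board, current, steps => (board, current, steps)
  | fuel + 1, board, current, steps =>
    let steps := steps + 1
    match bestNeighborB board with
    | none => (board, current, steps)
    | some best =>
      if best.2 > current then hillLoopB fuel best.1 best.2 steps
      else (board, current, steps)

def perform_hill_climb_alt (board : List Int) : List Int × Int × Int :=
  let c := count_safe_alt board
  hillLoopB ((28 - c).toNat + 1) board c 0

-- ===== PRECONDITION & SPEC =====
-- Pre_ excludes boards with fewer than 8 entries, on which A raises IndexError at board[col].
def Pre_perform_hill_climb (board : List Int) : Prop := 8 ≤ board.length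
instance (board : List Int) : Decidable (Pre_perform_hill_climb board) := by
  unfold Pre_perform_hill_climb; infer_instance
def pvWitness_perform_hill_climb : List Int := [0, 1, 2, 3, 4, 5, 6, 7]

def Spec_perform_hill_climb (board : List Int) (out : List Int × Int × Int) : Prop := out = perform_hill_climb_alt board
instance (board : List Int) (out : List Int × Int × Int) : Decidable (Spec_perform_hill_climb board out) := by unfold Spec_perform_hill_climb; infer_instance

-- ===== CLAIM (what is proved, stated in full; the proofs are below) =====
def Claim_equal_perform_hill_climb : Prop := ∀ (board : List Int), Dom_perform_hill_climb board → Pre_perform_hill_climb board → Spec_perform_hill_climb board (perform_hill_climb board)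

-- ===== LEMMAS AND PROOFS =====

-- ---- Part 1: the two scoring functions agree on every board ----

-- A's attacking count, named for the proofs (count_safe_queen_pairs board = 28 - attA board, rfl)
def attA (board : List Int) : Int :=
  (PySem.List.pyRange 0 (board.length : Int) 1).foldl (fun acc i =>
    (PySem.List.pyRange (i + 1) (board.length : Int) 1).foldl (fun acc j =>
      if PySem.List.pyGetD board i 0 = PySem.List.pyGetD board j 0 ∨
         (PySem.List.pyGetD board i 0 - PySem.List.pyGetD board j 0).natAbs = (i - j).natAbs
      then acc + 1 else acc) acc) 0

def initB : Int × PySem.Dict Int Int × PySem.Dict Int Int × PySem.Dict Int Int :=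
  (0, PySem.Dict.empty, PySem.Dict.empty, PySem.Dict.empty)

theorem attA_eq_sum (board : List Int) :
    attA board =
      ((PySem.List.pyRange 0 (board.length : Int) 1).map (fun i =>
        ((PySem.List.pyRange (i + 1) (board.length : Int) 1).countP (fun j =>
          decide (PySem.List.pyGetD board i 0 = PySem.List.pyGetD board j 0 ∨
            (PySem.List.pyGetD board i 0 - PySem.List.pyGetD board j 0).natAbs = (i - j).natAbs)) : Int))).sum := by
  unfold attA
  have h := PySem.List.foldl_congr_mem (PySem.List.pyRange 0 (board.length : Int) 1)
      _ _ 0 (fun acc i _ => PySem.List.foldl_ite_add_one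
        (fun j => PySem.List.pyGetD board i 0 = PySem.List.pyGetD board j 0 ∨
            (PySem.List.pyGetD board i 0 - PySem.List.pyGetD board j 0).natAbs = (i - j).natAbs)
        (PySem.List.pyRange (i + 1) (board.length : Int) 1) acc)
  rw [h, PySem.List.foldl_add]
  simp

theorem pyGetD_append_lt (xs ys : List Int) (i : Int) (d : Int)
    (h0 : 0 ≤ i) (h : i < (xs.length : Int)) :
    PySem.List.pyGetD (xs ++ ys) i d = PySem.List.pyGetD xs i d := by
  rw [PySem.List.pyGetD_of_nonneg _ _ h0, PySem.List.pyGetD_of_nonneg _ _ h0]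
  have hlt : i.toNat < xs.length := by omega
  simp [List.getD, List.getElem?_append_left hlt]

theorem pyGetD_append_self (xs : List Int) (x d : Int) :
    PySem.List.pyGetD (xs ++ [x]) (xs.length : Int) d = x := by
  rw [PySem.List.pyGetD_of_nonneg _ _ (by positivity)]
  simp [List.getD]

-- A's count over board ++ [x]: the old pairs plus the pairs formed with the new last queen
set_option maxHeartbeats 1000000 in
theorem attA_append (board : List Int) (x : Int) :
    attA (board ++ [x]) = attA board +
      ((PySem.List.pyRange 0 (board.length : Int) 1).countP (fun i =>
        decide (PySem.List.pyGetD board i 0 = x ∨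
          (PySem.List.pyGetD board i 0 - x).natAbs = (i - (board.length : Int)).natAbs)) : Int) := by
  have hn : (0:Int) ≤ (board.length : Int) := by positivity
  have hlen : (((board ++ [x]).length : Nat) : Int) = (board.length : Int) + 1 := by
    simp
  rw [attA_eq_sum, attA_eq_sum, hlen, PySem.List.pyRange_one_succ_right hn,
      List.map_append, List.sum_append]
  have hlast :
      ((([(board.length : Int)]).map (fun i =>
        ((PySem.List.pyRange (i + 1) ((board.length : Int) + 1) 1).countP (fun j =>
          decide (PySem.List.pyGetD (board ++ [x]) i 0 = PySem.List.pyGetD (board ++ [x]) j 0 ∨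
            (PySem.List.pyGetD (board ++ [x]) i 0 - PySem.List.pyGetD (board ++ [x]) j 0).natAbs =
              (i - j).natAbs)) : Int))).sum) = 0 := by
    have hr : PySem.List.pyRange ((board.length : Int) + 1) ((board.length : Int) + 1) 1 = [] := by
      simp [pysem]
    simp only [List.map_cons, List.map_nil, List.sum_cons, List.sum_nil, hr,
      List.countP_nil, Nat.cast_zero, add_zero]
  rw [hlast, add_zero]
  rw [List.map_congr_left (f := fun i =>
        ((PySem.List.pyRange (i + 1) ((board.length : Int) + 1) 1).countP (fun j =>
          decide (PySem.List.pyGetD (board ++ [x]) i 0 = PySem.List.pyGetD (board ++ [x]) j 0 ∨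
            (PySem.List.pyGetD (board ++ [x]) i 0 - PySem.List.pyGetD (board ++ [x]) j 0).natAbs =
              (i - j).natAbs)) : Int))
      (g := fun i =>
        ((PySem.List.pyRange (i + 1) (board.length : Int) 1).countP (fun j =>
          decide (PySem.List.pyGetD board i 0 = PySem.List.pyGetD board j 0 ∨
            (PySem.List.pyGetD board i 0 - PySem.List.pyGetD board j 0).natAbs = (i - j).natAbs)) : Int) +
        (if decide (PySem.List.pyGetD board i 0 = x ∨
            (PySem.List.pyGetD board i 0 - x).natAbs = (i - (board.length : Int)).natAbs) then (1:Int) else 0))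
      ?_]
  · rw [PySem.List.sum_map_add_int, PySem.List.sum_map_ite_one_zero]
  · intro i hi
    beta_reduce
    obtain ⟨hi0, hi1⟩ := PySem.List.mem_pyRange_one.mp hi
    have hgi : PySem.List.pyGetD (board ++ [x]) i 0 = PySem.List.pyGetD board i 0 :=
      pyGetD_append_lt _ _ _ _ hi0 hi1
    rw [PySem.List.pyRange_one_succ_right (by omega), List.countP_append]
    have hsmall : (PySem.List.pyRange (i + 1) (board.length : Int) 1).countP (fun j =>
          decide (PySem.List.pyGetD (board ++ [x]) i 0 = PySem.List.pyGetD (board ++ [x]) j 0 ∨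
            (PySem.List.pyGetD (board ++ [x]) i 0 - PySem.List.pyGetD (board ++ [x]) j 0).natAbs =
              (i - j).natAbs)) =
        (PySem.List.pyRange (i + 1) (board.length : Int) 1).countP (fun j =>
          decide (PySem.List.pyGetD board i 0 = PySem.List.pyGetD board j 0 ∨
            (PySem.List.pyGetD board i 0 - PySem.List.pyGetD board j 0).natAbs = (i - j).natAbs)) := by
      refine List.countP_congr ?_
      intro j hj
      obtain ⟨hj0, hj1⟩ := PySem.List.mem_pyRange_one.mp hj
      have hgj : PySem.List.pyGetD (board ++ [x]) j 0 = PySem.List.pyGetD board j 0 :=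
        pyGetD_append_lt _ _ _ _ (by omega) hj1
      simp [hgi, hgj]
    rw [hsmall]
    have hone : List.countP (fun j =>
          decide (PySem.List.pyGetD (board ++ [x]) i 0 = PySem.List.pyGetD (board ++ [x]) j 0 ∨
            (PySem.List.pyGetD (board ++ [x]) i 0 - PySem.List.pyGetD (board ++ [x]) j 0).natAbs =
              (i - j).natAbs)) [(board.length : Int)] =
        (if decide (PySem.List.pyGetD board i 0 = x ∨
            (PySem.List.pyGetD board i 0 - x).natAbs = (i - (board.length : Int)).natAbs) then 1 else 0) := by
      rw [List.countP_cons, List.countP_nil]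
      rw [hgi, pyGetD_append_self]
      simp
    rw [hone]
    push_cast
    ring

-- the three B counters are the value / r-i / r+i multiplicity counters of the processed prefix
theorem Bfold_rows (l : List (Int × Int)) (s : Int × PySem.Dict Int Int × PySem.Dict Int Int × PySem.Dict Int Int) :
    (l.foldl countStepB s).2.1 =
      (l.map (·.2)).foldl (fun d x => d.insert x (d.getD x 0 + 1)) s.2.1 := by
  induction l generalizing s with
  | nil => rfl
  | cons q t ih => simpa [countStepB] using ih (countStepB s q)

theorem Bfold_d1 (l : List (Int × Int)) (s : Int × PySem.Dict Int Int × PySem.Dict Int Int × PySem.Dict Int Int) :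
    (l.foldl countStepB s).2.2.1 =
      (l.map (fun q => q.2 - q.1)).foldl (fun d x => d.insert x (d.getD x 0 + 1)) s.2.2.1 := by
  induction l generalizing s with
  | nil => rfl
  | cons q t ih => simpa [countStepB] using ih (countStepB s q)

theorem Bfold_d2 (l : List (Int × Int)) (s : Int × PySem.Dict Int Int × PySem.Dict Int Int × PySem.Dict Int Int) :
    (l.foldl countStepB s).2.2.2 =
      (l.map (fun q => q.2 + q.1)).foldl (fun d x => d.insert x (d.getD x 0 + 1)) s.2.2.2 := by
  induction l generalizing s with
  | nil => rfl
  | cons q t ih => simpa [countStepB] using ih (countStepB s q)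

theorem Bfold_append (l : List (Int × Int)) (p : Int × Int) :
    ((l ++ [p]).foldl countStepB initB).1 =
      (l.foldl countStepB initB).1 +
        ((l.map (·.2)).count p.2 : Int) +
        ((l.map (fun q => q.2 - q.1)).count (p.2 - p.1) : Int) +
        ((l.map (fun q => q.2 + q.1)).count (p.2 + p.1) : Int) := by
  rw [List.foldl_append]
  show (l.foldl countStepB initB).1 + _ + _ + _ = _
  rw [Bfold_rows, Bfold_d1, Bfold_d2,
      PySem.Dict.getD_foldl_insert_add_one, PySem.Dict.getD_foldl_insert_add_one,
      PySem.Dict.getD_foldl_insert_add_one]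
  simp [initB]

-- the three attack conditions are mutually exclusive when the column indices differ
theorem counts_eq_countP (es : List (Int × Int)) (x n : Int) (h : ∀ q ∈ es, q.1 ≠ n) :
    (es.map (·.2)).count x + (es.map (fun q => q.2 - q.1)).count (x - n) +
      (es.map (fun q => q.2 + q.1)).count (x + n) =
    es.countP (fun q => decide (q.2 = x ∨ (q.2 - x).natAbs = (q.1 - n).natAbs)) := by
  induction es with
  | nil => rfl
  | cons q t ih =>
    have hq : q.1 ≠ n := h q (List.mem_cons_self)
    have ht := ih (fun r hr => h r (List.mem_cons_of_mem _ hr))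
    simp only [List.map_cons, List.count_cons, List.countP_cons]
    rw [← ht]
    simp only [beq_iff_eq, decide_eq_true_eq, Int.natAbs_eq_natAbs_iff]
    split_ifs <;> omega

theorem attA_eq_B (board : List Int) :
    attA board = ((PySem.List.enumerate board).foldl countStepB initB).1 := by
  induction board using List.reverseRecOn with
  | nil => rfl
  | append_singleton ys x ih =>
    have he : PySem.List.enumerate (ys ++ [x]) =
        PySem.List.enumerate ys ++ [((ys.length : Int), x)] := by
      rw [PySem.List.enumerate_append]
      simp [PySem.List.enumerate]
    have hq : ∀ q ∈ PySem.List.enumerate ys, q.1 ≠ (ys.length : Int) := by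
      intro q hmem
      obtain ⟨k, hk, rfl⟩ := (PySem.List.mem_enumerate_iff _ _ _).mp hmem
      simp only [zero_add]
      intro hcontra
      omega
    have hcnt := counts_eq_countP (PySem.List.enumerate ys) x (ys.length : Int) hq
    have hbridge : (PySem.List.enumerate ys).countP (fun q =>
          decide (q.2 = x ∨ (q.2 - x).natAbs = (q.1 - (ys.length : Int)).natAbs)) =
        (PySem.List.pyRange 0 (ys.length : Int) 1).countP (fun i =>
          decide (PySem.List.pyGetD ys i 0 = x ∨
            (PySem.List.pyGetD ys i 0 - x).natAbs = (i - (ys.length : Int)).natAbs)) := by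
      rw [PySem.List.enumerate_eq_map_pyRange ys 0, List.countP_map]
      rfl
    rw [attA_append, ih, he, Bfold_append, ← hbridge, ← hcnt]
    push_cast
    ring

theorem count_alt_fun_eq : count_safe_alt = count_safe_queen_pairs := by
  funext board
  show 28 - ((PySem.List.enumerate board).foldl countStepB initB).1 = _
  rw [← attA_eq_B]; rfl

-- ---- Part 2: B's flat running-best scan picks A's sorted head ----

-- head of an insertBy only depends on the head of the target list
theorem head?_insertBy (bef : List Int × Int → List Int × Int → Bool)
    (x : List Int × Int) (acc : List (List Int × Int)) :
    (PySem.List.insertBy bef x acc).head? =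
      some (match acc.head? with | none => x | some y => if bef x y then x else y) := by
  cases acc with
  | nil => simp [PySem.List.insertBy]
  | cons y ys => by_cases h : bef x y <;> simp [PySem.List.insertBy, h]

-- hence the head of the insertion-sort fold is a running "first strict max" fold
theorem head?_foldl_insertBy (bef : List Int × Int → List Int × Int → Bool) :
    ∀ (l : List (List Int × Int)) (acc : List (List Int × Int)),
    (l.foldl (fun a x => PySem.List.insertBy bef x a) acc).head? =
      l.foldl (fun o x => some (match o with | none => x | some y => if bef x y then x else y))
        acc.head? := by
  intro l
  induction l with
  | nil => intro acc; simp
  | cons x t ih =>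
    intro acc
    simp only [List.foldl_cons]
    rw [ih, head?_insertBy]

-- the head of A's stable reverse sort is exactly the running best
theorem head?_sorted_rev (l : List (List Int × Int)) :
    (PySem.List.sorted l (fun x => x.2) true).head? = l.foldl bestStep none := by
  rw [PySem.List.sorted_rev_eq_foldl_insertBy, head?_foldl_insertBy]
  have h : (fun (o : Option (List Int × Int)) (x : List Int × Int) =>
      some (match o with
            | none => x
            | some y => if (fun a b => decide (b.2 < a.2)) x y then x else y)) = bestStep := by
    funext o x
    cases o with
    | none => rfl
    | some y => by_cases h : y.2 < x.2 <;> simp [bestStep, h, gt_iff_lt]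
  rw [h]
  rfl

-- folding bestStep over a list built by conditional appends = the guarded running-best fold
theorem foldl_best_append (p : Int → Prop) [DecidablePred p] (f : Int → List Int × Int) :
    ∀ (xs : List Int) (acc : List (List Int × Int)) (o : Option (List Int × Int)),
    (xs.foldl (fun a x => if p x then a ++ [f x] else a) acc).foldl bestStep o =
      xs.foldl (fun b x => if p x then bestStep b (f x) else b) (acc.foldl bestStep o) := by
  intro xs
  induction xs with
  | nil => intro acc o; simp
  | cons x t ih =>
    intro acc o
    simp only [List.foldl_cons]
    by_cases h : p x
    · simp only [h, if_pos]
      rw [ih, List.foldl_append]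
      simp
    · simp only [h, ite_false]
      rw [ih]

-- B's flat range(64) scan, unrolled to the col/row double scan
theorem bestB_flat_to_nested (board : List Int) :
    bestNeighborB board =
      (PySem.List.pyRange 0 8 1).foldl (fun o col =>
        (PySem.List.pyRange 0 8 1).foldl (fun o row =>
          if PySem.List.pyGetD board col 0 ≠ row then
            bestStep o (PySem.List.pySetD board col row,
                        count_safe_queen_pairs (PySem.List.pySetD board col row))
          else o) o) none := by
  unfold bestNeighborB
  have hmap : (PySem.List.pyRange 0 64 1).map
        (fun k => (PySem.Int.floordiv k 8, PySem.Int.mod k 8)) =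
      (PySem.List.pyRange 0 8 1).flatMap (fun c => (PySem.List.pyRange 0 8 1).map (fun r => (c, r))) := by
    decide
  calc (PySem.List.pyRange 0 64 1).foldl (fun o k =>
        if PySem.List.pyGetD board (PySem.Int.floordiv k 8) 0 ≠ PySem.Int.mod k 8 then
          bestStep o (PySem.List.pySetD board (PySem.Int.floordiv k 8) (PySem.Int.mod k 8),
                      count_safe_alt (PySem.List.pySetD board (PySem.Int.floordiv k 8) (PySem.Int.mod k 8)))
        else o) none
      = ((PySem.List.pyRange 0 64 1).map
          (fun k => (PySem.Int.floordiv k 8, PySem.Int.mod k 8))).foldl (fun o p =>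
            if PySem.List.pyGetD board p.1 0 ≠ p.2 then
              bestStep o (PySem.List.pySetD board p.1 p.2,
                          count_safe_alt (PySem.List.pySetD board p.1 p.2))
            else o) none :=
        (List.foldl_map (f := fun k => (PySem.Int.floordiv k 8, PySem.Int.mod k 8))
          (g := fun (o : Option (List Int × Int)) (p : Int × Int) =>
            if PySem.List.pyGetD board p.1 0 ≠ p.2 then
              bestStep o (PySem.List.pySetD board p.1 p.2,
                          count_safe_alt (PySem.List.pySetD board p.1 p.2))
            else o)
          (l := PySem.List.pyRange 0 64 1) (init := none)).symm
    _ = ((PySem.List.pyRange 0 8 1).flatMap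
          (fun c => (PySem.List.pyRange 0 8 1).map (fun r => (c, r)))).foldl (fun o p =>
            if PySem.List.pyGetD board p.1 0 ≠ p.2 then
              bestStep o (PySem.List.pySetD board p.1 p.2,
                          count_safe_alt (PySem.List.pySetD board p.1 p.2))
            else o) none := by rw [hmap]
    _ = (PySem.List.pyRange 0 8 1).foldl (fun o col =>
          (PySem.List.pyRange 0 8 1).foldl (fun o row =>
            if PySem.List.pyGetD board col 0 ≠ row then
              bestStep o (PySem.List.pySetD board col row,
                          count_safe_queen_pairs (PySem.List.pySetD board col row))
            else o) o) none := by
        rw [List.foldl_flatMap, count_alt_fun_eq]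
        simp only [List.foldl_map]

-- B's scan computes the running best over A's neighbor list
theorem bestB_eq (board : List Int) :
    bestNeighborB board = (neighborsA board).foldl bestStep none := by
  rw [bestB_flat_to_nested]
  unfold neighborsA
  have G : ∀ (cols : List Int) (acc : List (List Int × Int)) (o : Option (List Int × Int)),
      (cols.foldl (fun a col =>
          (PySem.List.pyRange 0 8 1).foldl (fun a row =>
            if PySem.List.pyGetD board col 0 ≠ row then
              a ++ [(PySem.List.pySetD board col row,
                     count_safe_queen_pairs (PySem.List.pySetD board col row))]
            else a) a) acc).foldl bestStep o =
        cols.foldl (fun b col =>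
          (PySem.List.pyRange 0 8 1).foldl (fun b row =>
            if PySem.List.pyGetD board col 0 ≠ row then
              bestStep b (PySem.List.pySetD board col row,
                          count_safe_queen_pairs (PySem.List.pySetD board col row))
            else b) b) (acc.foldl bestStep o) := by
    intro cols
    induction cols with
    | nil => intro acc o; simp
    | cons c t ih =>
      intro acc o
      simp only [List.foldl_cons]
      rw [ih, foldl_best_append (p := fun row => PySem.List.pyGetD board c 0 ≠ row)
            (f := fun row => (PySem.List.pySetD board c row,
                              count_safe_queen_pairs (PySem.List.pySetD board c row)))]
  have := (G (PySem.List.pyRange 0 8 1) [] none).symm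
  simpa using this

-- ---- Part 3: the climb loops agree ----

theorem loop_eq : ∀ (fuel : Nat) (b : List Int) (c s : Int),
    hillLoopA fuel b c s = hillLoopB fuel b c s := by
  intro fuel
  induction fuel with
  | zero => intro b c s; rfl
  | succ f ih =>
    intro b c s
    simp only [hillLoopA, hillLoopB, head?_sorted_rev, ← bestB_eq]
    cases bestNeighborB b with
    | none => rfl
    | some best =>
      simp only
      by_cases h : best.2 > c
      · simp [h, ih]
      · simp [h]

theorem main_eq (board : List Int) : perform_hill_climb board = perform_hill_climb_alt board := by
  unfold perform_hill_climb perform_hill_climb_alt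
  rw [count_alt_fun_eq]
  exact loop_eq _ _ _ _

-- ===== VERDICT (by name: the statement is the Claim_ definition above) =====
theorem perform_hill_climb_spec : Claim_equal_perform_hill_climb := by
  intro board _ _
  unfold Spec_perform_hill_climb
  exact main_eq board
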